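-- pv_equiv track=rewrite | github.com/Kappaguard/casino-de-raul | euclid_advanced.py | euclid_advanced
-- ===== SOURCE A (Python) =====
-- def euclid(a_1, b_2):
--     """Осуществляет алгоритм Евклида для целых чисел"""
--
--     if a_1 == 0:
--         return b_2
--     elif b_2 == 0:
--         return a_1
--
--     y = min(a_1, b_2)
--     x = max(a_1, b_2)
--     r_ost = 0
--     p_ost = 0
--
--     while x > 0:
--         p_ost = r_ost
--         r_ost = x % y
--         if r_ost == 0:
--             break
--         x = (x // y) * y
--         y = r_ost
--     if p_ost == 0:
--         return min(a_1, b_2)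
--     elif (a_1 % p_ost != 0) or (b_2 % p_ost != 0):
--         p_ost = min(euclid(a_1, p_ost), euclid(b_2, p_ost))
--         return(p_ost)
--     else:
--         return(p_ost)
--
-- def euclid_advanced(a_1, b_2):
--     """Расширенный алгоритм Евклида для целых чисел"""
--     p_ost = euclid(a_1, b_2)  # для начала выполним прямой алгоритм Евклида
--     for i in range(1, a_1):
--         for k in range(1, b_2):
--             if p_ost == a_1 * i - b_2 * k:
--                 return(i, -k)
--             elif p_ost == b_2 * k - a_1 * i:
--                 return(-i, k)
-- ===== SOURCE B (Python) =====
-- def euclid(a_1, b_2):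
--     """Осуществляет алгоритм Евклида для целых чисел"""
--     if a_1 == 0:
--         return b_2
--     elif b_2 == 0:
--         return a_1
--     y = min(a_1, b_2)
--     x = max(a_1, b_2)
--     r_ost = 0
--     p_ost = 0
--     while x > 0:
--         p_ost = r_ost
--         r_ost = x % y
--         if r_ost == 0:
--             break
--         x = (x // y) * y
--         y = r_ost
--     if p_ost == 0:
--         return min(a_1, b_2)
--     elif (a_1 % p_ost != 0) or (b_2 % p_ost != 0):
--         return min(euclid(a_1, p_ost), euclid(b_2, p_ost))
--     else:
--         return p_ost
--
-- def euclid_advanced(a_1, b_2):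
--     """Bezout-style search: per i, solve for k by division instead of scanning all k."""
--     p_ost = euclid(a_1, b_2)
--     if b_2 < 2:
--         return None
--     for i in range(1, a_1):
--         t = a_1 * i
--         k1, r1 = divmod(t - p_ost, b_2)   # p_ost == a_1*i - b_2*k  =>  k == k1
--         k2, r2 = divmod(t + p_ost, b_2)   # p_ost == b_2*k - a_1*i  =>  k == k2
--         ok1 = r1 == 0 and 1 <= k1 < b_2
--         ok2 = r2 == 0 and 1 <= k2 < b_2
--         if ok1 and (not ok2 or k1 <= k2):
--             return (i, -k1)
--         if ok2:
--             return (-i, k2)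
--     return None
-- ===== Notes on version B (the rewrite author's own statement) =====
-- stated objective: faster
-- what changed: The O(a*b) nested scan over all (i,k) pairs is replaced by a single loop over i that computes the two candidate k values directly with one divmod each (k=(a*i∓p)/b), keeping A's first-hit tie-breaking by taking the smaller candidate k and preferring the first condition on ties.
import Mathlib
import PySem

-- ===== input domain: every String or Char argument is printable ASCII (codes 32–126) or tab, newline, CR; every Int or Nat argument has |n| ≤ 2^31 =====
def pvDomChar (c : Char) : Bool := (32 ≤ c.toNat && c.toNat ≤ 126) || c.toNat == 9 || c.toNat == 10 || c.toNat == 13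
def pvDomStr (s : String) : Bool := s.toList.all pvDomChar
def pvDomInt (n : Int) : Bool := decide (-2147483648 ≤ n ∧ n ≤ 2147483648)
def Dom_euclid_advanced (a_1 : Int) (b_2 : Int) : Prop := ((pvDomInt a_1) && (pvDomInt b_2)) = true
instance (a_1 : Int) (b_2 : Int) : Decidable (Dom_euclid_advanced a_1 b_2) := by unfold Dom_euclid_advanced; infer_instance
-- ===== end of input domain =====

-- B replaces A's O(a*b) nested scan by a per-i direct solve for k via one divmod each
-- (same return value; a timing run measures whether that is faster on the generated inputs).

-- ===== PORT A =====
-- while loop of `euclid`: state (x, y, r_ost, p_ost), returns the final p_ost.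
-- The Nat argument is ONLY a totality guard (fuel): |y| strictly decreases each
-- iteration, so the fuel `y.natAbs + 1` passed by `euclidF` is never exhausted.
def euclidLoopP : Nat → Int → Int → Int → Int → Int
  | 0, _, _, _, p => p
  | n + 1, x, y, r, p =>
    if 0 < x then
      let p' := r
      let r' := PySem.Int.mod x y
      if r' = 0 then p'
      else euclidLoopP n (PySem.Int.floordiv x y * y) r' r' p'
    else p

-- recursive `euclid`; the Nat argument is ONLY a totality guard (fuel): the measure
-- (2*(min a b).natAbs + (if 0 < max a b then 1 else 0)) strictly decreases at each
-- recursive call (the recursion argument p is a remainder mod a divisor chained down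
-- from min a b, so |p| < |min a b| and p has min a b's sign), hence the recursion
-- depth is at most 2*(min a b).natAbs + 2 and the fuel below is never exhausted.
def euclidF : Nat → Int → Int → Int
  | 0, _, _ => 0
  | n + 1, a_1, b_2 =>
    if a_1 = 0 then b_2
    else if b_2 = 0 then a_1
    else
      let y := min a_1 b_2
      let x := max a_1 b_2
      let p := euclidLoopP (y.natAbs + 1) x y 0 0
      if p = 0 then min a_1 b_2
      else if PySem.Int.mod a_1 p ≠ 0 ∨ PySem.Int.mod b_2 p ≠ 0 then
        min (euclidF n a_1 p) (euclidF n b_2 p)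
      else p

def euclid (a_1 b_2 : Int) : Int := euclidF (2 * (min a_1 b_2).natAbs + 4) a_1 b_2

-- inner `for k in range(1, b_2)` loop of A
def advInner (p a b i : Int) : List Int → Option (Int × Int)
  | [] => none
  | k :: ks =>
    if p = a * i - b * k then some (i, -k)
    else if p = b * k - a * i then some (-i, k)
    else advInner p a b i ks

-- outer `for i in range(1, a_1)` loop of A
def advOuter (p a b : Int) : List Int → Option (Int × Int)
  | [] => none
  | i :: is =>
    match advInner p a b i (PySem.List.pyRange 1 b 1) with
    | some v => some v
    | none => advOuter p a b is

def euclid_advanced (a_1 : Int) (b_2 : Int) : Option (Int × Int) :=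
  let p_ost := euclid a_1 b_2
  advOuter p_ost a_1 b_2 (PySem.List.pyRange 1 a_1 1)

-- ===== PORT B =====
-- per-i body of B: the two candidate k's computed by divmod
def altInner (p a b i : Int) : Option (Int × Int) :=
  let t := a * i
  let k1 := PySem.Int.floordiv (t - p) b
  let r1 := PySem.Int.mod (t - p) b
  let k2 := PySem.Int.floordiv (t + p) b
  let r2 := PySem.Int.mod (t + p) b
  if r1 = 0 ∧ 1 ≤ k1 ∧ k1 < b ∧ (¬(r2 = 0 ∧ 1 ≤ k2 ∧ k2 < b) ∨ k1 ≤ k2) then some (i, -k1)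
  else if r2 = 0 ∧ 1 ≤ k2 ∧ k2 < b then some (-i, k2)
  else none

def altOuter (p a b : Int) : List Int → Option (Int × Int)
  | [] => none
  | i :: is =>
    match altInner p a b i with
    | some v => some v
    | none => altOuter p a b is

def euclid_advanced_alt (a_1 : Int) (b_2 : Int) : Option (Int × Int) :=
  let p_ost := euclid a_1 b_2
  if b_2 < 2 then none
  else altOuter p_ost a_1 b_2 (PySem.List.pyRange 1 a_1 1)

-- ===== PRECONDITION & SPEC =====
def Spec_euclid_advanced (a_1 : Int) (b_2 : Int) (out : Option (Int × Int)) : Prop := out = euclid_advanced_alt a_1 b_2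
instance (a_1 : Int) (b_2 : Int) (out : Option (Int × Int)) : Decidable (Spec_euclid_advanced a_1 b_2 out) := by unfold Spec_euclid_advanced; infer_instance

-- ===== CLAIM (what is proved, stated in full; the proofs are below) =====
def Claim_equal_euclid_advanced : Prop := ∀ (a_1 : Int) (b_2 : Int), Dom_euclid_advanced a_1 b_2 → Spec_euclid_advanced a_1 b_2 (euclid_advanced a_1 b_2)

-- ===== LEMMAS AND PROOFS =====

-- generalisation of altInner to an arbitrary lower bound j for k (proof helper)
def altInnerG (p a b i j : Int) : Option (Int × Int) :=
  if PySem.Int.mod (a * i - p) b = 0 ∧ j ≤ PySem.Int.floordiv (a * i - p) b ∧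
      PySem.Int.floordiv (a * i - p) b < b ∧
      (¬(PySem.Int.mod (a * i + p) b = 0 ∧ j ≤ PySem.Int.floordiv (a * i + p) b ∧
          PySem.Int.floordiv (a * i + p) b < b) ∨
        PySem.Int.floordiv (a * i - p) b ≤ PySem.Int.floordiv (a * i + p) b) then
    some (i, -PySem.Int.floordiv (a * i - p) b)
  else if PySem.Int.mod (a * i + p) b = 0 ∧ j ≤ PySem.Int.floordiv (a * i + p) b ∧
      PySem.Int.floordiv (a * i + p) b < b then
    some (-i, PySem.Int.floordiv (a * i + p) b)
  else none

theorem altInnerG_one (p a b i : Int) : altInnerG p a b i 1 = altInner p a b i := rfl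

-- for 0 < b, "t = b * j" means "t divmod b gives quotient j, remainder 0"
theorem div_char (t b j : Int) (hb : 0 < b) :
    t = b * j ↔ (PySem.Int.mod t b = 0 ∧ PySem.Int.floordiv t b = j) := by
  constructor
  · rintro rfl
    constructor
    · rw [PySem.Int.mod_eq_zero_iff_dvd]; exact Dvd.intro j rfl
    · rw [PySem.Int.floordiv_eq_ediv_of_pos hb]
      exact Int.mul_ediv_cancel_left j (by omega)
  · rintro ⟨h1, h2⟩
    have h := PySem.Int.floordiv_mul_add_mod t b
    rw [h1, h2] at h
    calc t = j * b + 0 := h.symm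
    _ = b * j := by ring

theorem advInner_eq_altInnerG (p a b i : Int) (hb : 0 < b) :
    ∀ (n : Nat) (j : Int), 1 ≤ j → (b - j).toNat = n →
    advInner p a b i (PySem.List.pyRange j b 1) = altInnerG p a b i j := by
  intro n
  induction n with
  | zero =>
    intro j hj hn
    rw [PySem.List.pyRange_one_eq_nil (by omega), advInner, altInnerG]
    split_ifs with h1 h2
    · exfalso; omega
    · exfalso; omega
    · rfl
  | succ n ih =>
    intro j hj hn
    have hjb : j < b := by omega
    rw [PySem.List.pyRange_one_cons hjb, advInner]
    have hc1 : (p = a * i - b * j) ↔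
        (PySem.Int.mod (a * i - p) b = 0 ∧ PySem.Int.floordiv (a * i - p) b = j) := by
      rw [← div_char _ _ _ hb]; omega
    have hc2 : (p = b * j - a * i) ↔
        (PySem.Int.mod (a * i + p) b = 0 ∧ PySem.Int.floordiv (a * i + p) b = j) := by
      rw [← div_char _ _ _ hb]; omega
    set k1 := PySem.Int.floordiv (a * i - p) b with hk1
    set r1 := PySem.Int.mod (a * i - p) b with hr1
    set k2 := PySem.Int.floordiv (a * i + p) b with hk2
    set r2 := PySem.Int.mod (a * i + p) b with hr2
    by_cases h1 : p = a * i - b * j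
    · -- cond1 fires at k = j: r1 = 0 and k1 = j, and any valid k2 is ≥ j = k1
      obtain ⟨hr10, hk1j⟩ := hc1.mp h1
      rw [if_pos h1, altInnerG]
      rw [if_pos ⟨hr10, by omega, by omega, by
        by_cases h2 : r2 = 0 ∧ j ≤ k2 ∧ k2 < b
        · exact Or.inr (by omega)
        · exact Or.inl h2⟩]
      rw [← hk1, hk1j]
    · rw [if_neg h1]
      by_cases h2 : p = b * j - a * i
      · -- cond2 fires at k = j (and cond1 never fires at any admissible k ≤ j)
        obtain ⟨hr20, hk2j⟩ := hc2.mp h2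
        rw [if_pos h2, altInnerG]
        have hno1 : ¬(r1 = 0 ∧ j ≤ k1 ∧ k1 < b ∧ (¬(r2 = 0 ∧ j ≤ k2 ∧ k2 < b) ∨ k1 ≤ k2)) := by
          rintro ⟨ha1, ha2, ha3, ha4⟩
          rcases ha4 with ha4 | ha4
          · exact ha4 ⟨hr20, by omega, by omega⟩
          · -- k1 ≤ k2 = j ≤ k1 forces k1 = j, contradicting ¬cond1
            have : k1 = j := by omega
            exact h1 (hc1.mpr ⟨ha1, this⟩)
        rw [if_neg hno1, if_pos ⟨hr20, by omega, by omega⟩, ← hk2, hk2j]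
      · -- neither fires at j: recurse, and the bound j can be raised to j + 1
        rw [if_neg h2, ih (j + 1) (by omega) (by omega), altInnerG, altInnerG]
        have e1 : (r1 = 0 ∧ j + 1 ≤ k1 ∧ k1 < b ∧ (¬(r2 = 0 ∧ j + 1 ≤ k2 ∧ k2 < b) ∨ k1 ≤ k2)) ↔
            (r1 = 0 ∧ j ≤ k1 ∧ k1 < b ∧ (¬(r2 = 0 ∧ j ≤ k2 ∧ k2 < b) ∨ k1 ≤ k2)) := by
          constructor
          · rintro ⟨x1, x2, x3, x4⟩
            refine ⟨x1, by omega, x3, ?_⟩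
            rcases x4 with x4 | x4
            · left; rintro ⟨y1, y2, y3⟩
              have hk2ne : k2 ≠ j := fun h => h2 (hc2.mpr ⟨y1, h⟩)
              exact x4 ⟨y1, by omega, y3⟩
            · right; exact x4
          · rintro ⟨x1, x2, x3, x4⟩
            have hk1ne : k1 ≠ j := fun h => h1 (hc1.mpr ⟨x1, h⟩)
            refine ⟨x1, by omega, x3, ?_⟩
            rcases x4 with x4 | x4
            · left; rintro ⟨y1, y2, y3⟩; exact x4 ⟨y1, by omega, y3⟩
            · right; exact x4
        have e2 : (r2 = 0 ∧ j + 1 ≤ k2 ∧ k2 < b) ↔ (r2 = 0 ∧ j ≤ k2 ∧ k2 < b) := by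
          constructor
          · rintro ⟨x1, x2, x3⟩; exact ⟨x1, by omega, x3⟩
          · rintro ⟨x1, x2, x3⟩
            have : k2 ≠ j := fun h => h2 (hc2.mpr ⟨x1, h⟩)
            exact ⟨x1, by omega, x3⟩
        rw [if_congr e1 rfl rfl, if_congr e2 rfl rfl]

theorem advInner_eq_altInner (p a b i : Int) (hb : 2 ≤ b) :
    advInner p a b i (PySem.List.pyRange 1 b 1) = altInner p a b i := by
  rw [advInner_eq_altInnerG p a b i (by omega) (b - 1).toNat 1 (by omega) (by omega),
    altInnerG_one]

theorem advOuter_eq_altOuter (p a b : Int) (hb : 2 ≤ b) (is : List Int) :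
    advOuter p a b is = altOuter p a b is := by
  induction is with
  | nil => rfl
  | cons i is ih =>
    rw [advOuter, altOuter, advInner_eq_altInner p a b i hb, ih]

theorem advOuter_none (p a b : Int) (hb : b < 2) (is : List Int) :
    advOuter p a b is = none := by
  induction is with
  | nil => rfl
  | cons i is ih =>
    rw [advOuter, PySem.List.pyRange_one_eq_nil (by omega), advInner, ih]

-- ===== VERDICT (by name: the statement is the Claim_ definition above) =====
theorem euclid_advanced_spec : Claim_equal_euclid_advanced := by
  intro a b _
  unfold Spec_euclid_advanced euclid_advanced euclid_advanced_alt
  by_cases hb : b < 2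
  · rw [if_pos hb]
    exact advOuter_none _ a b hb _
  · rw [if_neg hb]
    exact advOuter_eq_altOuter _ a b (by omega) _
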